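-- pv_equiv track=rewrite | github.com/ServiceLayerNetworking/SLATE | global-controller/optimizer_header.py | svc_to_cid
-- ===== SOURCE A (Python) =====
-- def svc_to_cid(svc_order, unique_service):
--     svc_to_placement = list()
--     for svc in svc_order:
--         svc_to_placement.append(list())
--     # for i in range(len(svc_order)):
--     for svc, idx in svc_order.items():
--         for cid in unique_service:
--             if svc in unique_service[cid]: # check whether it is in the cluster
--                 svc_to_placement[idx].append(cid)
--     return svc_to_placement
-- ===== SOURCE B (Python) =====
-- def svc_to_cid(svc_order, unique_service):
--     cids_of = {}
--     for cid, svcs in unique_service.items():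
--         for svc in dict.fromkeys(svcs):
--             cids_of.setdefault(svc, []).append(cid)
--     svc_to_placement = [[] for _ in svc_order]
--     for svc, idx in svc_order.items():
--         cids = cids_of.get(svc)
--         if cids:
--             svc_to_placement[idx].extend(cids)
--     return svc_to_placement
-- ===== Notes on version B (the rewrite author's own statement) =====
-- stated objective: faster
-- what changed: A scans every cluster for every service with a list-membership test; B makes one pass over the cluster contents to build a service-to-cluster-ids dict and then assembles each service's row by a single lookup, so the inner membership scans disappear.
import Mathlib
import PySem

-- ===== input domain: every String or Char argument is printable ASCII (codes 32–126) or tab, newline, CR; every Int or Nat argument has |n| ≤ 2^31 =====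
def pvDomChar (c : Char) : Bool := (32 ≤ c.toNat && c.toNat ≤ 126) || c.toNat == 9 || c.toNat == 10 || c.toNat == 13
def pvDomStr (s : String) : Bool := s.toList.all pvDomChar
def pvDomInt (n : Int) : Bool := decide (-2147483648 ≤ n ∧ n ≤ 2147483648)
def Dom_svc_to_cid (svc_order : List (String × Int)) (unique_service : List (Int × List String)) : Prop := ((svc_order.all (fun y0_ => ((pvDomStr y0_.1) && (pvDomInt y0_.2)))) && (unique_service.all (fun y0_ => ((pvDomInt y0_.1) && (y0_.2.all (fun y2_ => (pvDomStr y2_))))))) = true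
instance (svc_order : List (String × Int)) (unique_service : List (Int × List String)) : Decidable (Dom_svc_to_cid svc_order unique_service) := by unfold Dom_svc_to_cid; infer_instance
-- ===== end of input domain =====

-- B replaces A's per-service scan over all clusters (a membership test in each cluster's list)
-- by one pass over the cluster contents building a service → cluster-ids map (objective: faster).

-- ===== PORT A =====
def svc_to_cid (svc_order : List (String × Int)) (unique_service : List (Int × List String)) : List (List Int) :=
  (PySem.Dict.ofList svc_order).items.foldl
    (fun pl p =>
      (PySem.Dict.ofList unique_service).keys.foldl
        (fun pl cid =>
          if ((PySem.Dict.ofList unique_service).getD cid []).contains p.1 then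
            PySem.List.pySetD pl p.2 (PySem.List.pyGetD pl p.2 [] ++ [cid])
          else pl)
        pl)
    ((PySem.Dict.ofList svc_order).keys.foldl (fun acc _ => acc ++ [([] : List Int)]) [])

-- ===== PORT B =====
def svc_to_cid_alt (svc_order : List (String × Int)) (unique_service : List (Int × List String)) : List (List Int) :=
  let cids_of : PySem.Dict String (List Int) :=
    (PySem.Dict.ofList unique_service).items.foldl
      (fun m q =>
        (PySem.List.dedup q.2).foldl
          (fun m svc => m.modify svc [] (fun v => v ++ [q.1])) m)
      PySem.Dict.empty
  (PySem.Dict.ofList svc_order).items.foldl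
    (fun res p =>
      match cids_of.get? p.1 with
      | none => res
      | some cids =>
        if cids.isEmpty then res
        else PySem.List.pySetD res p.2 (PySem.List.pyGetD res p.2 [] ++ cids))
    ((PySem.Dict.ofList svc_order).keys.map (fun _ => ([] : List Int)))

-- ===== PRECONDITION & SPEC =====
-- Pre_ excludes exactly the inputs on which A raises IndexError: a service that occurs in some
-- cluster but whose index lies outside [-len, len).  (B raises there too.)
def Pre_svc_to_cid (svc_order : List (String × Int)) (unique_service : List (Int × List String)) : Prop :=
  ∀ p ∈ (PySem.Dict.ofList svc_order).items,
    (∃ q ∈ (PySem.Dict.ofList unique_service).items, p.1 ∈ q.2) →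
      PySem.Raise.InRange (PySem.Dict.ofList svc_order).size p.2
instance (svc_order : List (String × Int)) (unique_service : List (Int × List String)) : Decidable (Pre_svc_to_cid svc_order unique_service) := by unfold Pre_svc_to_cid; infer_instance

def pvWitness_svc_to_cid : (List (String × Int)) × (List (Int × List String)) :=
  ([("a", 0), ("b", 1)], [(1, ["a"]), (2, ["a", "b"])])

def Spec_svc_to_cid (svc_order : List (String × Int)) (unique_service : List (Int × List String)) (out : List (List Int)) : Prop := out = svc_to_cid_alt svc_order unique_service
instance (svc_order : List (String × Int)) (unique_service : List (Int × List String)) (out : List (List Int)) : Decidable (Spec_svc_to_cid svc_order unique_service out) := by unfold Spec_svc_to_cid; infer_instance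

-- ===== CLAIM (what is proved, stated in full; the proofs are below) =====
def Claim_equal_svc_to_cid : Prop := ∀ (svc_order : List (String × Int)) (unique_service : List (Int × List String)), Dom_svc_to_cid svc_order unique_service → Pre_svc_to_cid svc_order unique_service → Spec_svc_to_cid svc_order unique_service (svc_to_cid svc_order unique_service)

-- ===== LEMMAS AND PROOFS =====

theorem pvIdx_lt {n : Nat} {i : Int} {j : Nat} (h : PySem.List.pyIdx? n i = some j) : j < n := by
  unfold PySem.List.pyIdx? at h
  split_ifs at h <;> simp_all <;> omega

theorem pvIdx_isSome {n : Nat} {i : Int} (h : PySem.Raise.InRange n i) :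
    ∃ j, PySem.List.pyIdx? n i = some j := by
  obtain ⟨h1, h2⟩ := h
  unfold PySem.List.pyIdx?
  split_ifs <;> simp_all

-- Python's wrapped extend 'xs[i] += l' as Lean's set/getD at the normalised Nat index
theorem pvExtend_eq (pl : List (List Int)) (i : Int) (l : List Int) (j : Nat)
    (h : PySem.List.pyIdx? pl.length i = some j) :
    PySem.List.pySetD pl i (PySem.List.pyGetD pl i [] ++ l) = pl.set j (pl.getD j [] ++ l) := by
  simp [PySem.List.pySetD, PySem.List.pySet?, PySem.List.pyGetD, PySem.List.pyGet?, h,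
    List.getD_eq_getElem?_getD]

theorem pvGetD_set (res : List (List Int)) (a : Nat) (v : List Int) (j : Nat) :
    (res.set a v).getD j [] = if j = a ∧ a < res.length then v else res.getD j [] := by
  by_cases ha : a < res.length
  · by_cases hj : j = a
    · subst hj; simp [List.getD_eq_getElem?_getD, List.getElem?_set, ha]
    · simp [List.getD_eq_getElem?_getD, List.getElem?_set, hj, Ne.symm hj, ha]
  · rw [List.set_eq_of_length_le (by omega)]
    simp [ha]

-- A's first loop builds a list of n empty lists
theorem pvInit_foldl {α : Type} (l : List α) (acc : List (List Int)) :
    l.foldl (fun acc _ => acc ++ [([] : List Int)]) acc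
      = acc ++ List.replicate l.length [] := by
  induction l generalizing acc with
  | nil => simp
  | cons a l ih => rw [List.foldl_cons, ih]; simp [List.replicate_succ]

-- A's inner loop when the membership test never fires: the row is untouched
theorem pvA_inner_nil (C : Int → Bool) (i : Int) (ks : List Int) (pl : List (List Int))
    (h : ks.filter C = []) :
    ks.foldl (fun pl cid =>
        if C cid then PySem.List.pySetD pl i (PySem.List.pyGetD pl i [] ++ [cid])
        else pl) pl = pl := by
  induction ks generalizing pl with
  | nil => rfl
  | cons k ks ih =>
    rw [List.filter_cons] at h
    by_cases hc : C k
    · simp [hc] at h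
    · rw [List.foldl_cons, if_neg hc]
      exact ih pl (by simpa [hc] using h)

-- A's inner loop in general: one extend of the row by the filtered cluster ids
theorem pvA_inner (C : Int → Bool) (i : Int) (j : Nat) (ks : List Int)
    (pl : List (List Int)) (h : PySem.List.pyIdx? pl.length i = some j) :
    ks.foldl (fun pl cid =>
        if C cid then PySem.List.pySetD pl i (PySem.List.pyGetD pl i [] ++ [cid])
        else pl) pl
      = pl.set j (pl.getD j [] ++ ks.filter C) := by
  induction ks generalizing pl with
  | nil =>
    have hj : j < pl.length := pvIdx_lt h
    rw [List.foldl_nil, List.filter_nil, List.append_nil,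
      List.getD_eq_getElem pl [] hj, List.set_getElem_self hj]
  | cons k ks ih =>
    rw [List.foldl_cons, List.filter_cons]
    by_cases hc : C k
    · rw [if_pos hc, if_pos hc, pvExtend_eq pl i [k] j h]
      have hlen : (pl.set j (pl.getD j [] ++ [k])).length = pl.length := by simp
      rw [ih (pl.set j (pl.getD j [] ++ [k])) (by rw [hlen]; exact h)]
      rw [List.set_set, pvGetD_set]
      rw [if_pos ⟨rfl, pvIdx_lt h⟩]
      simp
    · rw [if_neg hc, if_neg hc]
      exact ih pl h

-- B's map-building double loop, flattened to one fold over (service, cid) pairs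
theorem pvFoldFlatten (l : List (Int × List String)) (m0 : PySem.Dict String (List Int)) :
    l.foldl (fun m q =>
        (PySem.List.dedup q.2).foldl
          (fun m svc => m.modify svc [] (fun v => v ++ [q.1])) m) m0
      = (l.flatMap (fun q => (PySem.List.dedup q.2).map (fun svc => (svc, q.1)))).foldl
          (fun m p => m.modify p.1 [] (fun v => v ++ [p.2])) m0 := by
  induction l generalizing m0 with
  | nil => rfl
  | cons q l ih =>
    rw [List.foldl_cons, List.flatMap_cons, List.foldl_append, List.foldl_map]
    exact ih _

-- slicing the flattened pairs of one cluster by a service name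
theorem pvPairSlice (l : List String) (hnd : l.Nodup) (svc : String) (c : Int) :
    (((l.map (fun s => (s, c))).filter (fun p => p.1 == svc)).map (·.2))
      = if svc ∈ l then [c] else [] := by
  induction l with
  | nil => rfl
  | cons s l ih =>
    have hnd' := List.nodup_cons.mp hnd
    rw [List.map_cons, List.filter_cons]
    by_cases hs : s = svc
    · subst hs
      rw [if_pos (by simp), List.map_cons, ih hnd'.2, if_neg hnd'.1]
      simp
    · rw [if_neg (by simp [hs]), ih hnd'.2]
      simp [Ne.symm hs, hs]

theorem pvFlatMap_if {α : Type} (l : List (Int × α)) (P : (Int × α) → Bool) :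
    l.flatMap (fun q => if P q then [q.1] else []) = (l.filter P).map (·.1) := by
  induction l with
  | nil => rfl
  | cons q l ih => by_cases hq : P q <;> simp [hq, ih]

-- the dict identity behind A's inner test: filtering keys by a predicate on the values
theorem pvKeys_filter_getD (items : List (Int × List String))
    (hnd : (items.map (·.1)).Nodup) (x : String) :
    (items.map (·.1)).filter
        (fun cid => ((PySem.Dict.mk items).getD cid []).contains x)
      = (items.filter (fun q => q.2.contains x)).map (·.1) := by
  induction items with
  | nil => rfl
  | cons p rest ih =>
    obtain ⟨k, v⟩ := p
    simp only [List.map_cons] at hnd ⊢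
    have hnd' := List.nodup_cons.mp hnd
    have hself : (PySem.Dict.mk ((k, v) :: rest)).getD k [] = v := by
      simp [PySem.Dict.getD, PySem.Dict.get?_mk_cons]
    have hcongr : (rest.map (·.1)).filter
          (fun cid => ((PySem.Dict.mk ((k, v) :: rest)).getD cid []).contains x)
        = (rest.map (·.1)).filter
          (fun cid => ((PySem.Dict.mk rest).getD cid []).contains x) := by
      apply List.filter_congr
      intro cid hcid
      have hne : ¬ (k == cid) = true := by
        simp only [beq_iff_eq]
        intro he; rw [he] at hnd'; exact hnd'.1 hcid
      simp [PySem.Dict.getD, PySem.Dict.get?_mk_cons, hne]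
    rw [List.filter_cons, List.filter_cons, hcongr, ih hnd'.2]
    by_cases hp : v.contains x
    · have hxv : x ∈ v := by simpa using hp
      simp [hself, hxv]
    · have hxv : x ∉ v := by simpa using hp
      simp [hself, hxv]

-- what B's map holds for each service: exactly A's filtered cluster-id list
theorem pvMapChar (us : List (Int × List String)) (svc : String) :
    ((PySem.Dict.ofList us).items.foldl (fun m q =>
        (PySem.List.dedup q.2).foldl
          (fun m svc => m.modify svc [] (fun v => v ++ [q.1])) m)
      PySem.Dict.empty).getD svc []
      = (PySem.Dict.ofList us).keys.filter
          (fun cid => ((PySem.Dict.ofList us).getD cid []).contains svc) := by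
  set u := PySem.Dict.ofList us with hu
  have hkeysu : u.keys.Nodup := PySem.Dict.nodup_keys_ofList us
  rw [pvFoldFlatten, PySem.Dict.getD_foldl_modify_append, PySem.Dict.getD_empty,
    List.nil_append, List.filter_flatMap, List.map_flatMap]
  have h1 : u.items.flatMap (fun q =>
        (((PySem.List.dedup q.2).map (fun s => (s, q.1))).filter
          (fun p => p.1 == svc)).map (·.2))
      = u.items.flatMap (fun q => if q.2.contains svc then [q.1] else []) := by
    apply List.flatMap_congr
    intro q _
    rw [pvPairSlice (PySem.List.dedup q.2) (by exact PySem.Set.nodup_ofList q.2) svc q.1]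
    by_cases hm : svc ∈ q.2
    · rw [if_pos (by simpa [PySem.List.dedup, PySem.Set.mem_ofList] using hm),
        if_pos (by simpa using hm)]
    · rw [if_neg (by simpa [PySem.List.dedup, PySem.Set.mem_ofList] using hm),
        if_neg (by simpa using hm)]
  rw [h1, pvFlatMap_if u.items (fun q => q.2.contains svc)]
  exact (pvKeys_filter_getD u.items (by exact hkeysu) svc).symm

-- the main zip: A's outer loop and B's second loop act identically row by row
theorem pvZip (u : PySem.Dict Int (List String)) (m : PySem.Dict String (List Int)) (n : Nat)
    (hm : ∀ svc, m.getD svc [] = u.keys.filter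
        (fun cid => (u.getD cid []).contains svc))
    (l : List (String × Int)) (pl : List (List Int)) (hlen : pl.length = n)
    (hIR : ∀ p ∈ l,
      u.keys.filter (fun cid => (u.getD cid []).contains p.1) ≠ [] →
        PySem.Raise.InRange n p.2) :
    l.foldl (fun pl p =>
        u.keys.foldl (fun pl cid =>
          if (u.getD cid []).contains p.1 then
            PySem.List.pySetD pl p.2 (PySem.List.pyGetD pl p.2 [] ++ [cid])
          else pl) pl) pl
      = l.foldl (fun res p =>
          match m.get? p.1 with
          | none => res
          | some cids =>
            if cids.isEmpty then res
            else PySem.List.pySetD res p.2 (PySem.List.pyGetD res p.2 [] ++ cids)) pl := by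
  induction l generalizing pl with
  | nil => rfl
  | cons p l ih =>
    rw [List.foldl_cons, List.foldl_cons]
    have hstep : u.keys.foldl (fun pl cid =>
          if (u.getD cid []).contains p.1 then
            PySem.List.pySetD pl p.2 (PySem.List.pyGetD pl p.2 [] ++ [cid])
          else pl) pl
        = (match m.get? p.1 with
          | none => pl
          | some cids =>
            if cids.isEmpty then pl
            else PySem.List.pySetD pl p.2 (PySem.List.pyGetD pl p.2 [] ++ cids)) := by
      have hmp := hm p.1
      cases hg : m.get? p.1 with
      | none =>
        have hnil : u.keys.filter (fun cid => (u.getD cid []).contains p.1) = [] := by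
          rw [← hmp]; simp [PySem.Dict.getD, hg]
        exact pvA_inner_nil _ p.2 u.keys pl hnil
      | some cids =>
        show _ = if cids.isEmpty then pl
          else PySem.List.pySetD pl p.2 (PySem.List.pyGetD pl p.2 [] ++ cids)
        have hcids : cids = u.keys.filter (fun cid => (u.getD cid []).contains p.1) := by
          rw [← hmp]; simp [PySem.Dict.getD, hg]
        by_cases he : cids.isEmpty
        · rw [if_pos he]
          exact pvA_inner_nil _ p.2 u.keys pl
            (by rw [← hcids]; exact List.isEmpty_iff.mp he)
        · rw [if_neg he]
          have hne : u.keys.filter (fun cid => (u.getD cid []).contains p.1) ≠ [] := by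
            rw [← hcids]; exact fun hh => he (List.isEmpty_iff.mpr hh)
          obtain ⟨j, hj⟩ := pvIdx_isSome (hIR p (by simp) hne)
          rw [pvA_inner _ p.2 j u.keys pl (by rw [hlen]; exact hj), hcids,
            pvExtend_eq pl p.2 _ j (by rw [hlen]; exact hj)]
    rw [hstep]
    have hlen2 : ∀ (x : List (List Int)), x.length = n →
        (match m.get? p.1 with
          | none => x
          | some cids =>
            if cids.isEmpty then x
            else PySem.List.pySetD x p.2 (PySem.List.pyGetD x p.2 [] ++ cids)).length = n := by
      intro x hx
      cases m.get? p.1 with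
      | none => exact hx
      | some cids =>
        by_cases he : cids.isEmpty
        · simp [he, hx]
        · simp [he, PySem.List.pySetD, PySem.List.pySet?]
          cases hk : PySem.List.pyIdx? x.length p.2 <;> simp [hx]
    exact ih _ (hlen2 pl hlen) (fun q hq => hIR q (by simp [hq]))

-- ===== VERDICT (by name: the statement is the Claim_ definition above) =====
theorem svc_to_cid_spec : Claim_equal_svc_to_cid := by
  intro so us _hdom hpre
  unfold Spec_svc_to_cid svc_to_cid svc_to_cid_alt
  set d := PySem.Dict.ofList so with hdd
  set u := PySem.Dict.ofList us with huu
  set n := d.size with hn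
  have hkeyslen : d.keys.length = n := by
    simp [PySem.Dict.keys, PySem.Dict.size, hn]
  have hinit : d.keys.foldl (fun acc _ => acc ++ [([] : List Int)]) []
      = List.replicate n [] := by
    rw [pvInit_foldl, List.nil_append, hkeyslen]
  have hinitB : d.keys.map (fun _ => ([] : List Int)) = List.replicate n [] := by
    rw [List.map_const', hkeyslen]
  have hIR : ∀ p ∈ d.items,
      u.keys.filter (fun cid => (u.getD cid []).contains p.1) ≠ [] →
        PySem.Raise.InRange n p.2 := by
    intro p hp hne
    apply hpre p hp
    obtain ⟨cid, hcid⟩ := List.exists_mem_of_ne_nil _ hne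
    have hcid' := List.mem_filter.mp hcid
    obtain ⟨v, hv⟩ := Option.ne_none_iff_exists'.mp
      ((PySem.Dict.get?_eq_none_iff_not_mem_keys u cid).mp.mt (by simp [hcid'.1]))
    refine ⟨(cid, v), PySem.Dict.mem_items_of_get?_eq_some u hv, ?_⟩
    have : (u.getD cid []).contains p.1 = true := hcid'.2
    rw [PySem.Dict.getD, hv] at this
    simpa using this
  rw [hinit, hinitB]
  exact pvZip u _ n (pvMapChar us) d.items (List.replicate n []) (by simp) hIR
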